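-- pv_equiv track=rewrite | github.com/harrydu-db/lineage-analyzer | src/sql_extractor/sql_extractor.py | _is_bteq_command
-- ===== SOURCE A (Python) =====
-- def _is_bteq_command(line: str, line_upper: str) -> bool:
--     """
--     Check if a line is a BTEQ command (case insensitive).
--
--     Args:
--         line: The original line
--         line_upper: The line in uppercase for case-insensitive comparison
--
--     Returns:
--         True if the line is a BTEQ command, False otherwise
--     """
--     # BTEQ commands that don't need dot prefix
--     bteq_commands_no_dot = [
--         'BT', 'ET', 'SLEEP'
--     ]
--
--     # Check for commands without dot prefix first (with or without semicolon)
--     for cmd in bteq_commands_no_dot: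
--         if (line_upper == cmd or
--             line_upper == cmd + ';' or
--             line_upper.startswith(cmd + ' ') or
--             line_upper.startswith(cmd + ';')):
--             return True
--
--     # BTEQ commands that require dot prefix
--     if not line.startswith('.'):
--         return False
--
--     # Comprehensive list of BTEQ commands with dot prefix (case insensitive)
--     bteq_commands_with_dot = [
--         '.ABORT', '.ACCOUNT', '.AUTOCONNECT', '.AUTODISCONNECT', '.AUTOLOGON',
--         '.BEGQUERY', '.BREAK', '.BT', '.CHECKPOINT', '.CLOSE', '.CONNECT',
--         '.CONTINUE', '.DATABASE', '.DEFAULTS', '.DISCARD', '.DISCONNECT',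
--         '.DISTRIBUTION', '.DUMP', '.ECHO', '.ENDQUERY', '.ERRORCODE', '.ERRORLEVEL',
--         '.ERROROUT', '.ET', '.EXIT', '.EXPORT', '.FORMAT', '.GOTO', '.HELP',
--         '.IF', '.IMPORT', '.INDICDATA', '.LABEL', '.LAST', '.LOGOFF', '.LOGON',
--         '.LOGMECH', '.MACRO', '.MESSAGE', '.NONSTOP', '.NULL', '.PACK', '.PACKET',
--         '.PASSWORD', '.PRINT', '.QUERY', '.QUIET', '.QUIT', '.RECORD', '.REPEAT',
--         '.REPEATMODE', '.RESET', '.RETRY', '.RETURN', '.RUN', '.RUNFILE', '.SAMPLE',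
--         '.SESSIONS', '.SET', '.SEVERITY', '.SHOW', '.SID', '.SKIP', '.SLEEP', '.SPOOL',
--         '.TDP', '.TERM', '.TIMEOUT', '.TITLE', '.UNPACK', '.WIDTH', '.ZERO'
--     ]
--
--     # Check if line starts with any BTEQ command with dot prefix
--     for cmd in bteq_commands_with_dot:
--         if line_upper.startswith(cmd):
--             return True
--
--     return False
-- ===== SOURCE B (Python) =====
-- # Slice-and-set re-implementation: instead of looping over command lists and calling
-- # startswith per command, take fixed-length prefixes of line_upper and test membership
-- # in frozensets of commands (plus a boundary-character check for the dot-less ones).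
--
-- _NO_DOT = frozenset(('BT', 'ET', 'SLEEP'))
--
-- _DOT = frozenset(
--     '.ABORT .ACCOUNT .AUTOCONNECT .AUTODISCONNECT .AUTOLOGON '
--     '.BEGQUERY .BREAK .BT .CHECKPOINT .CLOSE .CONNECT '
--     '.CONTINUE .DATABASE .DEFAULTS .DISCARD .DISCONNECT '
--     '.DISTRIBUTION .DUMP .ECHO .ENDQUERY .ERRORCODE .ERRORLEVEL '
--     '.ERROROUT .ET .EXIT .EXPORT .FORMAT .GOTO .HELP '
--     '.IF .IMPORT .INDICDATA .LABEL .LAST .LOGOFF .LOGON '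
--     '.LOGMECH .MACRO .MESSAGE .NONSTOP .NULL .PACK .PACKET '
--     '.PASSWORD .PRINT .QUERY .QUIET .QUIT .RECORD .REPEAT '
--     '.REPEATMODE .RESET .RETRY .RETURN .RUN .RUNFILE .SAMPLE '
--     '.SESSIONS .SET .SEVERITY .SHOW .SID .SKIP .SLEEP .SPOOL '
--     '.TDP .TERM .TIMEOUT .TITLE .UNPACK .WIDTH .ZERO'.split()
-- )
--
--
-- def _is_bteq_command(line: str, line_upper: str) -> bool:
--     # dot-less commands: exact leading match of length 2 or 5, followed by
--     # nothing, a space or a semicolon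
--     for k in (2, 5):
--         if line_upper[:k] in _NO_DOT and line_upper[k:k + 1] in ('', ' ', ';'):
--             return True
--     if not line.startswith('.'):
--         return False
--     # dot commands are bare prefixes of length 3..15
--     return any(line_upper[:k] in _DOT for k in range(3, 16))
-- ===== Notes on version B (the rewrite author's own statement) =====
-- stated objective: alternative
-- what changed: Replaces A's loops over command lists with four startswith/equality tests per command by taking fixed-length prefix slices of line_upper and testing membership in frozensets: lengths 2 and 5 plus a boundary-character slice for the dot-less commands, and lengths 3..15 for the dot commands.
import Mathlib
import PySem

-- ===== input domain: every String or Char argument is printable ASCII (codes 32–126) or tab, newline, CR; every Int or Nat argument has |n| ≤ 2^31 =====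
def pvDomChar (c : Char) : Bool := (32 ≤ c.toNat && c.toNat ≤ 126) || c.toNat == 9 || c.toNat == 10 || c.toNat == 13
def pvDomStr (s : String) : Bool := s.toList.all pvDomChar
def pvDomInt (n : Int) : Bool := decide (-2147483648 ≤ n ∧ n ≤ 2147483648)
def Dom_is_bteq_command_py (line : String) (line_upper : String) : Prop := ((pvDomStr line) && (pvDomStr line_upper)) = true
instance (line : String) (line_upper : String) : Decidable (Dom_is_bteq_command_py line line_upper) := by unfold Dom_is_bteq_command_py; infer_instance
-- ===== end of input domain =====

-- B replaces A's per-command loops of startswith tests by fixed-length prefix slices of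
-- line_upper looked up in sets of commands (objective: alternative).

-- ===== PORT A =====
-- A's two command tables, as char lists (uppercase literals)
def pvNoDotA : List (List Char) := [['B', 'T'], ['E', 'T'], ['S', 'L', 'E', 'E', 'P']]
def pvDotA : List (List Char) :=
  [['.', 'A', 'B', 'O', 'R', 'T'], ['.', 'A', 'C', 'C', 'O', 'U', 'N', 'T'], ['.', 'A', 'U', 'T', 'O', 'C', 'O', 'N', 'N', 'E', 'C', 'T'], ['.', 'A', 'U', 'T', 'O', 'D', 'I', 'S', 'C', 'O', 'N', 'N', 'E', 'C', 'T'], ['.', 'A', 'U', 'T', 'O', 'L', 'O', 'G', 'O', 'N'],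
   ['.', 'B', 'E', 'G', 'Q', 'U', 'E', 'R', 'Y'], ['.', 'B', 'R', 'E', 'A', 'K'], ['.', 'B', 'T'], ['.', 'C', 'H', 'E', 'C', 'K', 'P', 'O', 'I', 'N', 'T'], ['.', 'C', 'L', 'O', 'S', 'E'], ['.', 'C', 'O', 'N', 'N', 'E', 'C', 'T'],
   ['.', 'C', 'O', 'N', 'T', 'I', 'N', 'U', 'E'], ['.', 'D', 'A', 'T', 'A', 'B', 'A', 'S', 'E'], ['.', 'D', 'E', 'F', 'A', 'U', 'L', 'T', 'S'], ['.', 'D', 'I', 'S', 'C', 'A', 'R', 'D'], ['.', 'D', 'I', 'S', 'C', 'O', 'N', 'N', 'E', 'C', 'T'],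
   ['.', 'D', 'I', 'S', 'T', 'R', 'I', 'B', 'U', 'T', 'I', 'O', 'N'], ['.', 'D', 'U', 'M', 'P'], ['.', 'E', 'C', 'H', 'O'], ['.', 'E', 'N', 'D', 'Q', 'U', 'E', 'R', 'Y'], ['.', 'E', 'R', 'R', 'O', 'R', 'C', 'O', 'D', 'E'], ['.', 'E', 'R', 'R', 'O', 'R', 'L', 'E', 'V', 'E', 'L'],
   ['.', 'E', 'R', 'R', 'O', 'R', 'O', 'U', 'T'], ['.', 'E', 'T'], ['.', 'E', 'X', 'I', 'T'], ['.', 'E', 'X', 'P', 'O', 'R', 'T'], ['.', 'F', 'O', 'R', 'M', 'A', 'T'], ['.', 'G', 'O', 'T', 'O'], ['.', 'H', 'E', 'L', 'P'],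
   ['.', 'I', 'F'], ['.', 'I', 'M', 'P', 'O', 'R', 'T'], ['.', 'I', 'N', 'D', 'I', 'C', 'D', 'A', 'T', 'A'], ['.', 'L', 'A', 'B', 'E', 'L'], ['.', 'L', 'A', 'S', 'T'], ['.', 'L', 'O', 'G', 'O', 'F', 'F'], ['.', 'L', 'O', 'G', 'O', 'N'],
   ['.', 'L', 'O', 'G', 'M', 'E', 'C', 'H'], ['.', 'M', 'A', 'C', 'R', 'O'], ['.', 'M', 'E', 'S', 'S', 'A', 'G', 'E'], ['.', 'N', 'O', 'N', 'S', 'T', 'O', 'P'], ['.', 'N', 'U', 'L', 'L'], ['.', 'P', 'A', 'C', 'K'], ['.', 'P', 'A', 'C', 'K', 'E', 'T'],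
   ['.', 'P', 'A', 'S', 'S', 'W', 'O', 'R', 'D'], ['.', 'P', 'R', 'I', 'N', 'T'], ['.', 'Q', 'U', 'E', 'R', 'Y'], ['.', 'Q', 'U', 'I', 'E', 'T'], ['.', 'Q', 'U', 'I', 'T'], ['.', 'R', 'E', 'C', 'O', 'R', 'D'], ['.', 'R', 'E', 'P', 'E', 'A', 'T'],
   ['.', 'R', 'E', 'P', 'E', 'A', 'T', 'M', 'O', 'D', 'E'], ['.', 'R', 'E', 'S', 'E', 'T'], ['.', 'R', 'E', 'T', 'R', 'Y'], ['.', 'R', 'E', 'T', 'U', 'R', 'N'], ['.', 'R', 'U', 'N'], ['.', 'R', 'U', 'N', 'F', 'I', 'L', 'E'], ['.', 'S', 'A', 'M', 'P', 'L', 'E'],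
   ['.', 'S', 'E', 'S', 'S', 'I', 'O', 'N', 'S'], ['.', 'S', 'E', 'T'], ['.', 'S', 'E', 'V', 'E', 'R', 'I', 'T', 'Y'], ['.', 'S', 'H', 'O', 'W'], ['.', 'S', 'I', 'D'], ['.', 'S', 'K', 'I', 'P'], ['.', 'S', 'L', 'E', 'E', 'P'], ['.', 'S', 'P', 'O', 'O', 'L'],
   ['.', 'T', 'D', 'P'], ['.', 'T', 'E', 'R', 'M'], ['.', 'T', 'I', 'M', 'E', 'O', 'U', 'T'], ['.', 'T', 'I', 'T', 'L', 'E'], ['.', 'U', 'N', 'P', 'A', 'C', 'K'], ['.', 'W', 'I', 'D', 'T', 'H'], ['.', 'Z', 'E', 'R', 'O']]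

def is_bteq_command_py (line : String) (line_upper : String) : Bool :=
  if pvNoDotA.any (fun cmd =>
       line_upper.toList == cmd || line_upper.toList == cmd ++ [';'] ||
       PySem.Chars.startswith line_upper.toList (cmd ++ [' ']) ||
       PySem.Chars.startswith line_upper.toList (cmd ++ [';'])) then
    true
  else if !PySem.Chars.startswith line.toList ['.'] then
    false
  else
    pvDotA.any (fun cmd => PySem.Chars.startswith line_upper.toList cmd)

-- ===== PORT B =====
-- B's sets: the dot-less commands, and the dot commands obtained by splitting one string
def pvNoDotB : PySem.Set String := PySem.Set.ofList ["BT", "ET", "SLEEP"]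
def pvDotB : PySem.Set String := PySem.Set.ofList (PySem.Str.split₀
  (".ABORT .ACCOUNT .AUTOCONNECT .AUTODISCONNECT .AUTOLOGON " ++
   ".BEGQUERY .BREAK .BT .CHECKPOINT .CLOSE .CONNECT " ++
   ".CONTINUE .DATABASE .DEFAULTS .DISCARD .DISCONNECT " ++
   ".DISTRIBUTION .DUMP .ECHO .ENDQUERY .ERRORCODE .ERRORLEVEL " ++
   ".ERROROUT .ET .EXIT .EXPORT .FORMAT .GOTO .HELP " ++
   ".IF .IMPORT .INDICDATA .LABEL .LAST .LOGOFF .LOGON " ++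
   ".LOGMECH .MACRO .MESSAGE .NONSTOP .NULL .PACK .PACKET " ++
   ".PASSWORD .PRINT .QUERY .QUIET .QUIT .RECORD .REPEAT " ++
   ".REPEATMODE .RESET .RETRY .RETURN .RUN .RUNFILE .SAMPLE " ++
   ".SESSIONS .SET .SEVERITY .SHOW .SID .SKIP .SLEEP .SPOOL " ++
   ".TDP .TERM .TIMEOUT .TITLE .UNPACK .WIDTH .ZERO"))

def is_bteq_command_py_alt (line : String) (line_upper : String) : Bool :=
  -- for k in (2, 5): prefix of length k in the set, followed by '', ' ' or ';'
  if ([2, 5] : List Int).any (fun k =>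
       pvNoDotB.contains (String.ofList (PySem.List.slice line_upper.toList none (some k))) &&
       (["", " ", ";"] : List String).contains
         (String.ofList (PySem.List.slice line_upper.toList (some k) (some (k + 1))))) then
    true
  else
    -- dot commands are bare prefixes of length 3..15
    PySem.Chars.startswith line.toList ['.'] &&
    (PySem.List.pyRange 3 16 1).any (fun k =>
      pvDotB.contains (String.ofList (PySem.List.slice line_upper.toList none (some k))))

-- ===== PRECONDITION & SPEC =====
def Spec_is_bteq_command_py (line : String) (line_upper : String) (out : Bool) : Prop := out = is_bteq_command_py_alt line line_upper
instance (line : String) (line_upper : String) (out : Bool) : Decidable (Spec_is_bteq_command_py line line_upper out) := by unfold Spec_is_bteq_command_py; infer_instance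

-- ===== CLAIM =====
def Claim_equal_is_bteq_command_py : Prop := ∀ (line : String) (line_upper : String), Dom_is_bteq_command_py line line_upper → Spec_is_bteq_command_py line line_upper (is_bteq_command_py line line_upper)

-- ===== LEMMAS AND PROOFS =====

-- PySem.Set.contains on a string set is list containment
theorem pvSetContains (s : List String) (x : String) : PySem.Set.contains s x = List.contains s x := rfl

-- membership of a rebuilt string in a string list, read on the char-list side
theorem pvContainsToList (L : List String) (LL : List (List Char))
    (h : L.map String.toList = LL) (cs : List Char) :
    L.contains (String.ofList cs) = LL.contains cs := by
  subst h
  rw [Bool.eq_iff_iff]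
  simp only [List.contains_iff_mem, List.mem_map]
  constructor
  · intro hm
    exact ⟨String.ofList cs, hm, String.toList_ofList⟩
  · rintro ⟨s, hs, rfl⟩
    simpa [String.ofList_toList] using hs

-- the tables of the two ports name the same commands
set_option maxRecDepth 100000 in
set_option maxHeartbeats 4000000 in
theorem pvDotMap : pvDotB.map String.toList = pvDotA := by decide
theorem pvNoDotMap : (["BT", "ET", "SLEEP"] : List String).map String.toList = pvNoDotA := by decide
theorem pvSepMap : ((["", " ", ";"] : List String).map String.toList) = [[], [' '], [';']] := by decide
theorem pvNoDotBEq : pvNoDotB = ["BT", "ET", "SLEEP"] := by decide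
theorem pvDotLen : ∀ cmd ∈ pvDotA, 3 ≤ cmd.length ∧ cmd.length < 16 := by decide

-- dot part: A's per-command prefix scan = B's prefix-length scan over the set
theorem pvDotEq (lu : List Char) :
    pvDotA.any (fun cmd => PySem.Chars.startswith lu cmd) =
      (PySem.List.pyRange 3 16 1).any (fun k =>
        pvDotB.contains (String.ofList (PySem.List.slice lu none (some k)))) := by
  rw [Bool.eq_iff_iff]
  simp only [List.any_eq_true, PySem.Chars.startswith_iff, PySem.List.mem_pyRange_one]
  constructor
  · rintro ⟨cmd, hm, hp⟩
    obtain ⟨h3, h16⟩ := pvDotLen cmd hm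
    refine ⟨(cmd.length : Int), ⟨by exact_mod_cast h3, by exact_mod_cast h16⟩, ?_⟩
    rw [pvSetContains, PySem.List.slice_to_natCast, ← List.prefix_iff_eq_take.mp hp,
        pvContainsToList _ _ pvDotMap, List.contains_iff_mem]
    exact hm
  · rintro ⟨k, ⟨h3, h16⟩, hc⟩
    rw [pvSetContains, PySem.List.slice_to lu (by omega : (0:Int) ≤ k), pvContainsToList _ _ pvDotMap,
        List.contains_iff_mem] at hc
    exact ⟨lu.take k.toNat, hc, List.take_prefix _ _⟩

-- dot-less part: A's four tests per command = B's slice-and-set test per length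
theorem pvNoDotEq (lu : List Char) :
    pvNoDotA.any (fun cmd =>
        lu == cmd || lu == cmd ++ [';'] ||
        PySem.Chars.startswith lu (cmd ++ [' ']) ||
        PySem.Chars.startswith lu (cmd ++ [';'])) =
      ([2, 5] : List Int).any (fun k =>
        pvNoDotB.contains (String.ofList (PySem.List.slice lu none (some k))) &&
        (["", " ", ";"] : List String).contains
          (String.ofList (PySem.List.slice lu (some k) (some (k + 1))))) := by
  rw [Bool.eq_iff_iff, pvNoDotBEq]
  simp only [pvSetContains, List.any_eq_true, Bool.or_eq_true, Bool.and_eq_true, beq_iff_eq,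
    PySem.Chars.startswith_iff]
  constructor
  · rintro ⟨cmd, hm, hcase⟩
    -- the chosen length is cmd's own length (2 or 5)
    refine ⟨(cmd.length : Int), ?_, ?_, ?_⟩
    · fin_cases hm <;> simp
    · -- the length-|cmd| prefix is cmd
      have htake : lu.take cmd.length = cmd := by
        rcases hcase with ((h | h) | h) | h
        · rw [h, List.take_length]
        · rw [h, List.take_left]
        · obtain ⟨t, rfl⟩ := h
          rw [List.append_assoc]; exact List.take_left
        · obtain ⟨t, rfl⟩ := h
          rw [List.append_assoc]; exact List.take_left
      rw [PySem.List.slice_to_natCast, htake,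
          pvContainsToList _ _ pvNoDotMap, List.contains_iff_mem]
      exact hm
    · -- the following character is '', ' ' or ';'
      have hslice : PySem.List.slice lu (some (cmd.length : Int)) (some ((cmd.length : Int) + 1)) =
          (lu.drop cmd.length).take 1 := by
        have := PySem.List.slice_natCast_add lu cmd.length 1
        simpa using this
      rw [hslice, pvContainsToList _ _ pvSepMap, List.contains_iff_mem]
      rcases hcase with ((h | h) | h) | h
      · subst h; simp
      · subst h; simp
      · obtain ⟨t, rfl⟩ := h
        rw [List.append_assoc, List.drop_left]; simp
      · obtain ⟨t, rfl⟩ := h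
        rw [List.append_assoc, List.drop_left]; simp
  · rintro ⟨k, hk, hpre, hsep⟩
    -- k is the literal 2 or 5, hence nonnegative
    have hk0 : 0 ≤ k := by fin_cases hk <;> norm_num
    rw [PySem.List.slice_to lu hk0, List.contains_iff_mem] at hpre
    have hslice : PySem.List.slice lu (some k) (some (k + 1)) = (lu.drop k.toNat).take 1 := by
      rw [PySem.List.slice_toNat lu hk0 (by omega)]
      congr 1
      omega
    rw [hslice, pvContainsToList _ _ pvSepMap, List.contains_iff_mem] at hsep
    -- the matched command is the length-k prefix itself
    have hmem : lu.take k.toNat ∈ pvNoDotA := by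
      rw [← pvNoDotMap]
      have := List.mem_map_of_mem (f := String.toList) hpre
      rwa [String.toList_ofList] at this
    simp only [List.mem_cons, List.not_mem_nil, or_false] at hsep
    refine ⟨lu.take k.toNat, hmem, ?_⟩
    have hsplit : lu = lu.take k.toNat ++ lu.drop k.toNat := (List.take_append_drop _ _).symm
    rcases hsep with h | h | h
    · -- next slice empty: lu is exactly the command
      have hd : lu.drop k.toNat = [] := by
        cases hdrop : lu.drop k.toNat with
        | nil => rfl
        | cons c t => rw [hdrop] at h; simp at h
      exact Or.inl (Or.inl (Or.inl (by nth_rewrite 1 [hsplit]; rw [hd, List.append_nil])))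
    · -- next character is a space
      obtain ⟨c, t, hdrop⟩ : ∃ c t, lu.drop k.toNat = c :: t := by
        cases hdrop : lu.drop k.toNat with
        | nil => rw [hdrop] at h; simp at h
        | cons c t => exact ⟨c, t, rfl⟩
      rw [hdrop] at h hsplit
      simp only [List.take_succ_cons, List.take_zero, List.cons.injEq, and_true] at h
      subst h
      exact Or.inl (Or.inr ⟨t, by rw [List.append_assoc]; exact hsplit.symm⟩)
    · -- next character is a semicolon
      obtain ⟨c, t, hdrop⟩ : ∃ c t, lu.drop k.toNat = c :: t := by
        cases hdrop : lu.drop k.toNat with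
        | nil => rw [hdrop] at h; simp at h
        | cons c t => exact ⟨c, t, rfl⟩
      rw [hdrop] at h hsplit
      simp only [List.take_succ_cons, List.take_zero, List.cons.injEq, and_true] at h
      subst h
      exact Or.inr ⟨t, by rw [List.append_assoc]; exact hsplit.symm⟩

-- ===== VERDICT =====
theorem is_bteq_command_py_spec : Claim_equal_is_bteq_command_py := by
  intro line line_upper _
  unfold Spec_is_bteq_command_py is_bteq_command_py is_bteq_command_py_alt
  rw [pvNoDotEq line_upper.toList, pvDotEq line_upper.toList]
  cases ([2, 5] : List Int).any (fun k =>
      pvNoDotB.contains (String.ofList (PySem.List.slice line_upper.toList none (some k))) &&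
      (["", " ", ";"] : List String).contains
        (String.ofList (PySem.List.slice line_upper.toList (some k) (some (k + 1))))) <;>
    cases hs : PySem.Chars.startswith line.toList ['.'] <;> simp
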